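-- pv_equiv track=rewrite | github.com/renatobarbosadc/LPC-2023_2 | doninha/doninha.py | retorna_melhor_frase
-- ===== SOURCE A (Python) =====
-- CONST_FRASE = "METHINKS IT IS LIKE A WEASEL"
--
-- def retorna_melhor_frase(lista_auxiliar):
--     lista_pontos = []
--     for i in lista_auxiliar:
--         pontuacao = 0
--         for j in range(0, 28):
--             if i[j] == CONST_FRASE[j]:
--                 pontuacao = pontuacao + 1
--         lista_pontos.append(pontuacao)
--     posicao_melhor = lista_pontos.index(max(lista_pontos))
--     melhor_frase = lista_auxiliar[posicao_melhor]
--     return melhor_frase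
-- ===== SOURCE B (Python) =====
-- CONST_FRASE = "METHINKS IT IS LIKE A WEASEL"
--
-- def retorna_melhor_frase(lista_auxiliar):
--     # Column-wise scoring: one vector update per character position,
--     # instead of A's per-phrase inner loop over positions.
--     pontos = [0] * len(lista_auxiliar)
--     for j in range(0, 28):
--         pontos = [p + (1 if frase[j] == CONST_FRASE[j] else 0)
--                   for p, frase in zip(pontos, lista_auxiliar)]
--     # Online argmax with strict '>' (keeps the FIRST maximum),
--     # instead of A's max() followed by .index().
--     melhor = 0
--     for i in range(1, len(lista_auxiliar)):
--         if pontos[i] > pontos[melhor]: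
--             melhor = i
--     return lista_auxiliar[melhor]
-- ===== Notes on version B (the rewrite author's own statement) =====
-- stated objective: alternative
-- what changed: Transposed the scoring: instead of A's row-wise inner loop per phrase plus max()/list.index()/subscript, B sweeps the 28 character positions column-wise, rebuilding a score vector with a zip comprehension each round, and then selects the first maximum with a single online argmax scan using strict '>'.
import Mathlib
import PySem

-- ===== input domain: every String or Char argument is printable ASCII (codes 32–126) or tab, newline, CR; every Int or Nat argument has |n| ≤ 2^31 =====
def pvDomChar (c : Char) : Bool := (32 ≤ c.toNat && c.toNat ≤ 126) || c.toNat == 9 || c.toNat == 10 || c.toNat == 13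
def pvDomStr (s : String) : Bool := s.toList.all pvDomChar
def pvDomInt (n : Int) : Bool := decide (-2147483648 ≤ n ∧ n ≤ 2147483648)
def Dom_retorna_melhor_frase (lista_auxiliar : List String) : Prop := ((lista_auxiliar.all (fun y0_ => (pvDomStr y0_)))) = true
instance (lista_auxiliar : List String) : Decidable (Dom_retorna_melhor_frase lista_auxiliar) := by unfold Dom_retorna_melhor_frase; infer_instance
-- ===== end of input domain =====

-- B transposes A's scoring (a column-wise sweep over the 28 character positions rebuilding
-- a score vector) and replaces max()/list.index()/subscript by one online argmax scan.

def pvConstFrase : String := "METHINKS IT IS LIKE A WEASEL"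

-- ===== PORT A =====
-- A's inner loop: pontuacao accumulated over range(0, 28); i[j]/CONST_FRASE[j] via Str.pyGet?
-- (returns none where Python raises IndexError; Pre_ excludes strings shorter than 28).
def pvPontosA (i : String) : Int :=
  (PySem.List.pyRange 0 28).foldl
    (fun pontuacao j =>
      if PySem.Str.pyGet? i j == PySem.Str.pyGet? pvConstFrase j then pontuacao + 1 else pontuacao)
    0

def retorna_melhor_frase (lista_auxiliar : List String) : String :=
  let lista_pontos := lista_auxiliar.foldl (fun acc i => acc ++ [pvPontosA i]) []
  (((PySem.List.max? lista_pontos (fun x => x)).bind (fun m =>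
      (PySem.List.index? lista_pontos m).bind (fun posicao_melhor =>
        PySem.List.pyGet? lista_auxiliar (Int.ofNat posicao_melhor))))).getD ""

-- ===== PORT B =====
-- the 0/1 summand of B's zip comprehension
def pvInd (j : Int) (frase : String) : Int :=
  if PySem.Str.pyGet? frase j == PySem.Str.pyGet? pvConstFrase j then 1 else 0

def retorna_melhor_frase_alt (lista_auxiliar : List String) : String :=
  let pontos := (PySem.List.pyRange 0 28).foldl
      (fun pontos j => (pontos.zip lista_auxiliar).map (fun pf => pf.1 + pvInd j pf.2))
      (List.replicate lista_auxiliar.length 0)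
  let melhor := (PySem.List.pyRange 1 (lista_auxiliar.length : Int)).foldl
      (fun melhor i =>
        if PySem.List.pyGetD pontos melhor 0 < PySem.List.pyGetD pontos i 0 then i else melhor)
      0
  (PySem.List.pyGet? lista_auxiliar melhor).getD ""

-- ===== PRECONDITION & SPEC =====
-- Pre_: exactly where Python A returns — a nonempty list (Python's max raises on an empty
-- sequence; B's final subscript raises there too) of phrases of length ≥ 28 (shorter ones
-- raise IndexError in both programs).
def Pre_retorna_melhor_frase (lista_auxiliar : List String) : Prop :=
  lista_auxiliar ≠ [] ∧ ∀ s ∈ lista_auxiliar, 28 ≤ s.length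
instance (lista_auxiliar : List String) : Decidable (Pre_retorna_melhor_frase lista_auxiliar) := by unfold Pre_retorna_melhor_frase; infer_instance

def pvWitness_retorna_melhor_frase : List String :=
  ["METHINKS IT IS LIKE A WEASEL", "AETHINKS IT IS LIKE A WEASEL"]

def Spec_retorna_melhor_frase (lista_auxiliar : List String) (out : String) : Prop := out = retorna_melhor_frase_alt lista_auxiliar
instance (lista_auxiliar : List String) (out : String) : Decidable (Spec_retorna_melhor_frase lista_auxiliar out) := by unfold Spec_retorna_melhor_frase; infer_instance

-- ===== CLAIM (what is proved, stated in full; the proofs are below) =====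
def Claim_equal_retorna_melhor_frase : Prop := ∀ (lista_auxiliar : List String), Dom_retorna_melhor_frase lista_auxiliar → Pre_retorna_melhor_frase lista_auxiliar → Spec_retorna_melhor_frase lista_auxiliar (retorna_melhor_frase lista_auxiliar)

-- ===== LEMMAS AND PROOFS =====

-- B's per-phrase score, read off column-wise accumulation
def pvScore (s : String) : Int :=
  (PySem.List.pyRange 0 28).foldl (fun t j => t + pvInd j s) 0

theorem pvPontos_eq (s : String) : pvPontosA s = pvScore s := by
  unfold pvPontosA pvScore
  have h : (fun (pontuacao : Int) (j : Int) =>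
      if PySem.Str.pyGet? s j == PySem.Str.pyGet? pvConstFrase j then pontuacao + 1 else pontuacao)
      = (fun (t : Int) (j : Int) => t + pvInd j s) := by
    funext p j; unfold pvInd; split <;> omega
  rw [h]

theorem zip_map_left_self {α β : Type} (g : α → β) :
    ∀ (l : List α), (l.map g).zip l = l.map (fun s => (g s, s)) := by
  intro l; induction l with
  | nil => rfl
  | cons a t ih => simp [ih]

-- transposition: the column-wise vector folds compute the per-phrase score fold
theorem pvTranspose (l : List String) :
    ∀ (js : List Int) (g : String → Int),
      js.foldl (fun ps j => (ps.zip l).map (fun pf => pf.1 + pvInd j pf.2)) (l.map g)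
        = l.map (fun s => js.foldl (fun t j => t + pvInd j s) (g s)) := by
  intro js
  induction js with
  | nil => intro g; simp
  | cons j js ih =>
    intro g
    simp only [List.foldl_cons]
    rw [zip_map_left_self g l, List.map_map]
    exact ih (fun s => g s + pvInd j s)

theorem pvScores_eq (l : List String) :
    (PySem.List.pyRange 0 28).foldl
        (fun ps j => (ps.zip l).map (fun pf => pf.1 + pvInd j pf.2))
        (List.replicate l.length 0)
      = l.map pvScore := by
  have h0 : List.replicate l.length (0 : Int) = l.map (fun _ => 0) := by
    rw [← List.map_const']
  rw [h0, pvTranspose l (PySem.List.pyRange 0 28) (fun _ => 0)]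
  rfl

-- the online-argmax loop returns an index r with: r in range, q[r] maximal, all earlier strictly smaller
theorem pvLoop_spec (q : List Int) :
    ∀ (k : Nat), 1 ≤ k → ∃ (r : Nat),
      (PySem.List.pyRange 1 (k : Int)).foldl
          (fun m i => if PySem.List.pyGetD q m 0 < PySem.List.pyGetD q i 0 then i else m) 0
        = (r : Int)
      ∧ r < k
      ∧ (∀ i < k, q.getD i 0 ≤ q.getD r 0)
      ∧ (∀ i < r, q.getD i 0 < q.getD r 0) := by
  intro k
  induction k with
  | zero => intro h; omega
  | succ k ih =>
    intro _
    by_cases hk : 1 ≤ k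
    · obtain ⟨r, hfold, hrk, hmax, hstrict⟩ := ih hk
      have hsplit : PySem.List.pyRange 1 ((k + 1 : Nat) : Int)
          = PySem.List.pyRange 1 (k : Int) ++ [(k : Int)] := by
        push_cast
        exact PySem.List.pyRange_one_succ_right (by exact_mod_cast hk)
      rw [hsplit, List.foldl_append, hfold]
      simp only [List.foldl_cons, List.foldl_nil]
      have hgr : PySem.List.pyGetD q ((r : Nat) : Int) 0 = q.getD r 0 := by
        rw [PySem.List.pyGetD_of_nonneg q 0 (Int.natCast_nonneg r)]; simp
      have hgk : PySem.List.pyGetD q ((k : Nat) : Int) 0 = q.getD k 0 := by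
        rw [PySem.List.pyGetD_of_nonneg q 0 (Int.natCast_nonneg k)]; simp
      rw [hgr, hgk]
      by_cases hlt : q.getD r 0 < q.getD k 0
      · refine ⟨k, by rw [if_pos hlt], by omega, ?_, ?_⟩
        · intro i hi
          rcases Nat.lt_succ_iff_lt_or_eq.mp hi with h | rfl
          · exact le_of_lt (lt_of_le_of_lt (hmax i h) hlt)
          · exact le_refl _
        · intro i hi
          exact lt_of_le_of_lt (hmax i hi) hlt
      · refine ⟨r, by rw [if_neg hlt], by omega, ?_, hstrict⟩
        intro i hi
        rcases Nat.lt_succ_iff_lt_or_eq.mp hi with h | rfl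
        · exact hmax i h
        · exact le_of_not_gt hlt
    · have hk1 : k = 0 := by omega
      subst hk1
      refine ⟨0, ?_, by omega, ?_, by omega⟩
      · rw [PySem.List.pyRange_one_eq_nil (by norm_num)]; rfl
      · intro i hi; interval_cases i; exact le_refl _

-- first index of v when everything before it differs from v
theorem pvIndex?_of_first (v : Int) :
    ∀ (xs : List Int) (k : Nat), k < xs.length →
      xs.getD k 0 = v → (∀ j < k, xs.getD j 0 ≠ v) →
        PySem.List.index? xs v = some k := by
  intro xs
  induction xs with
  | nil => intro k hk; simp at hk
  | cons x t ih =>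
    intro k hk hval hne
    cases k with
    | zero =>
      simp only [List.getD_cons_zero] at hval
      subst hval
      exact PySem.List.index?_cons_self x t
    | succ k =>
      have hx : x ≠ v := by
        have := hne 0 (Nat.succ_pos k)
        simpa using this
      rw [PySem.List.index?_cons_of_ne t hx]
      have : PySem.List.index? t v = some k := by
        refine ih k (by simpa using hk) (by simpa using hval) ?_
        intro j hj
        have := hne (j + 1) (by omega)
        simpa using this
      rw [this]; rfl

-- A's foldl-append accumulation of scores is map
theorem pvAcc_eq_map (l : List String) :
    l.foldl (fun acc i => acc ++ [pvPontosA i]) [] = l.map pvScore := by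
  rw [PySem.List.foldl_append_singleton_eq_map, List.nil_append]
  exact List.map_congr_left (fun s _ => pvPontos_eq s)

-- ===== VERDICT (by name: the statement is the Claim_ definition above) =====
theorem retorna_melhor_frase_spec : Claim_equal_retorna_melhor_frase := by
  intro l _ hpre
  show retorna_melhor_frase l = retorna_melhor_frase_alt l
  simp only [retorna_melhor_frase, retorna_melhor_frase_alt]
  rw [pvAcc_eq_map, pvScores_eq]
  set q := l.map pvScore with hq
  have hlen : q.length = l.length := by simp [hq]
  have hn : 1 ≤ l.length := by
    cases l with
    | nil => exact absurd rfl hpre.1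
    | cons a t => simp
  obtain ⟨r, hfold, hrk, hmax, hstrict⟩ := pvLoop_spec q l.length hn
  -- B side computes l[r]?
  rw [hfold]
  -- A side: max? q id = some (q.getD r 0)
  have hrlen : r < q.length := by omega
  have hmem : q.getD r 0 ∈ q := by
    rw [List.getD_eq_getElem q 0 hrlen]
    exact List.getElem_mem hrlen
  obtain ⟨m, hm⟩ : ∃ m, PySem.List.max? q (fun x => x) = some m := by
    rcases hx : PySem.List.max? q (fun x => x) with _ | m
    · rw [PySem.List.max?_eq_none_iff] at hx
      rw [hx] at hlen; simp at hlen; omega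
    · exact ⟨m, rfl⟩
  have hmle : m ≤ q.getD r 0 := by
    have hmmem : m ∈ q := PySem.List.max?_mem hm
    obtain ⟨i, hi, hqi⟩ := List.mem_iff_getElem.mp hmmem
    have : q.getD i 0 ≤ q.getD r 0 := hmax i (by omega)
    rw [List.getD_eq_getElem q 0 hi, hqi] at this
    exact this
  have hlem : q.getD r 0 ≤ m := PySem.List.max?_isMax hm _ hmem
  have hmeq : m = q.getD r 0 := le_antisymm hmle hlem
  have hidx : PySem.List.index? q m = some r := by
    refine pvIndex?_of_first m q r hrlen hmeq.symm ?_
    intro j hj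
    rw [hmeq]
    exact ne_of_lt (hstrict j hj)
  rw [hm, Option.bind_some, hidx, Option.bind_some]
  simp
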